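-- pv_equiv track=rewrite | github.com/Tsarcasm831/Temp | scripts/split_otogakure_stats.py | _clean_visual_notes
-- ===== SOURCE A (Python) =====
-- def _clean_visual_notes(text: str, location: str = None, location_english: str = None) -> str:
--     if not isinstance(text, str):
--         return ""
--     t = text.strip()
--     # Remove generic variant suffixes or location mentions
--     for needle in ["variant markings adjusted for", "Variant tuned for", "Variant for", "adjusted for"]:
--         idx = t.lower().find(needle)
--         if idx != -1:
--             t = t[:idx].strip()
--     # Remove explicit location labels
--     for nm in [location or "", location_english or ""]:
--         if nm:
--             t = t.replace(nm, "").strip()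
--     # Normalize punctuation
--     t = t.strip(" ;,.")
--     return t
-- ===== SOURCE B (Python) =====
-- _NEEDLES = ["variant markings adjusted for", "Variant tuned for", "Variant for", "adjusted for"]
--
--
-- def _clean_visual_notes(text: str, location: str = None, location_english: str = None) -> str:
--     if not isinstance(text, str):
--         return ""
--     t = text.strip()
--     # Single scan: cut once at the leftmost hit of any needle (looked up, as before,
--     # in the lowercased text), instead of four successive find/truncate passes.
--     hits = [i for i in (t.lower().find(n) for n in _NEEDLES) if i != -1]
--     if hits:
--         t = t[:min(hits)].strip()
--     for nm in [location or "", location_english or ""]: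
--         if nm:
--             t = t.replace(nm, "").strip()
--     return t.strip(" ;,.")
-- ===== Notes on version B (the rewrite author's own statement) =====
-- stated objective: alternative
-- what changed: The four ordered find/truncate passes over the (re-lowercased) text are replaced by one scan that collects each needle's match position in the stripped text once and cuts a single time at the leftmost hit; the location-replace loop and final punctuation strip are unchanged.
import Mathlib
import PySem

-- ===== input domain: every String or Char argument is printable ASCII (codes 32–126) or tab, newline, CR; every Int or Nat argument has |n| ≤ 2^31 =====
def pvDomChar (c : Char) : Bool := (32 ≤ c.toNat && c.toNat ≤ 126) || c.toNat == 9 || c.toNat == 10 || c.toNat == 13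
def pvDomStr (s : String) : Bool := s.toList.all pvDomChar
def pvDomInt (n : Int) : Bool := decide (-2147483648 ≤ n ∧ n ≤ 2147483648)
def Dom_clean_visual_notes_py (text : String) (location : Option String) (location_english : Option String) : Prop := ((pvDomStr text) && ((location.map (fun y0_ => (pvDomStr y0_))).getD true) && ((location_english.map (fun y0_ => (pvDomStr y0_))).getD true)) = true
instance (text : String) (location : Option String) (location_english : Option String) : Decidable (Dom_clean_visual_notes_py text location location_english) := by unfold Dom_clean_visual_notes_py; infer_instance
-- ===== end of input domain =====

-- B replaces A's four successive find/truncate passes by one pass that records every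
-- needle's position in the stripped text and cuts once at the leftmost hit (objective: alternative).

-- ===== PORT A =====
-- A's `for needle in [...]` loop: foldl over the needle list; each step re-lowers the
-- current text, finds the needle and truncates at it.  The `location or ""` of Python
-- (None → "") is Option.getD "".
def clean_visual_notes_py (text : String) (location : Option String) (location_english : Option String) : String :=
  let t0 := PySem.Str.strip text
  let t1 := (["variant markings adjusted for", "Variant tuned for", "Variant for", "adjusted for"] : List String).foldl
    (fun tt needle =>
      let idx := PySem.Str.find (PySem.Str.lower tt) needle
      if idx ≠ -1 then PySem.Str.strip (PySem.Str.slice tt none (some idx)) else tt) t0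
  let t2 := [location.getD "", location_english.getD ""].foldl
    (fun tt nm => if nm ≠ "" then PySem.Str.strip (PySem.Str.replace tt nm "") else tt) t1
  PySem.Str.stripChars t2 " ;,."

-- ===== PORT B =====
def pvNeedles : List String := ["variant markings adjusted for", "Variant tuned for", "Variant for", "adjusted for"]

-- B: one scan collecting all match positions, one cut at the leftmost one.
-- Python's `min(hits)` on the (guarded nonempty) list is `PySem.List.min? … |>.getD 0`
-- (the default is unreachable under the guard).
def clean_visual_notes_py_alt (text : String) (location : Option String) (location_english : Option String) : String :=
  let t0 := PySem.Str.strip text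
  let low := PySem.Str.lower t0
  let hits := (pvNeedles.map (fun n => PySem.Str.find low n)).filter (fun i => i != -1)
  let t1 := if hits ≠ [] then
      PySem.Str.strip (PySem.Str.slice t0 none (some ((PySem.List.min? hits (fun i => i)).getD 0)))
    else t0
  let t2 := [location.getD "", location_english.getD ""].foldl
    (fun tt nm => if nm ≠ "" then PySem.Str.strip (PySem.Str.replace tt nm "") else tt) t1
  PySem.Str.stripChars t2 " ;,."

-- ===== PRECONDITION & SPEC =====
def Spec_clean_visual_notes_py (text : String) (location : Option String) (location_english : Option String) (out : String) : Prop := out = clean_visual_notes_py_alt text location location_english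
instance (text : String) (location : Option String) (location_english : Option String) (out : String) : Decidable (Spec_clean_visual_notes_py text location location_english out) := by unfold Spec_clean_visual_notes_py; infer_instance

-- ===== CLAIM (what is proved, stated in full; the proofs are below) =====
def Claim_equal_clean_visual_notes_py : Prop := ∀ (text : String) (location : Option String) (location_english : Option String), Dom_clean_visual_notes_py text location location_english → Spec_clean_visual_notes_py text location location_english (clean_visual_notes_py text location location_english)

-- ===== LEMMAS AND PROOFS =====

-- `lowerChar` never produces an uppercase letter, in particular never 'V'.
lemma pv_lowerChar_ne_V (c : Char) : PySem.Chars.lowerChar c ≠ 'V' := by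
  unfold PySem.Chars.lowerChar PySem.Chars.isupper
  split_ifs with h
  · intro hc
    simp only [Bool.and_eq_true, decide_eq_true_eq, Char.le_def] at h
    have h1 : 65 ≤ c.toNat := UInt32.le_iff_toNat_le.mp h.1
    have h2 : c.toNat ≤ 90 := UInt32.le_iff_toNat_le.mp h.2
    have hv : (c.toNat + 32).isValidChar := Or.inl (by omega)
    have h3 := congrArg Char.toNat hc
    rw [Char.toNat_ofNat, if_pos hv] at h3
    have h4 : c.toNat + 32 = 86 := by simpa using h3
    omega
  · intro hc
    rw [hc] at h
    exact h (by decide)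

-- whitespace characters are unchanged by `lowerChar`
lemma pv_ws_lowerChar (c : Char) (h : PySem.Chars.isspace c = true) : PySem.Chars.lowerChar c = c := by
  unfold PySem.Chars.lowerChar
  rw [if_neg]
  intro hu
  unfold PySem.Chars.isspace at h
  unfold PySem.Chars.isupper at hu
  simp only [Bool.and_eq_true, decide_eq_true_eq, Char.le_def] at hu
  have h65 : 65 ≤ c.toNat := UInt32.le_iff_toNat_le.mp hu.1
  have h90 : c.toNat ≤ 90 := UInt32.le_iff_toNat_le.mp hu.2
  simp only [Bool.or_eq_true, Bool.and_eq_true, decide_eq_true_eq] at h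
  omega

-- needles containing 'V' are never found in a lowercased string
lemma pv_dead (s sub : List Char) (hV : 'V' ∈ sub) :
    PySem.Chars.find (PySem.Chars.lower s) sub = -1 := by
  by_contra h
  have hinf : sub <:+: PySem.Chars.lower s := (PySem.Chars.find_ne_neg_one_iff _ _).mp h
  have hmem : 'V' ∈ PySem.Chars.lower s := hinf.subset hV
  unfold PySem.Chars.lower at hmem
  obtain ⟨c, _, hc⟩ := List.mem_map.mp hmem
  exact pv_lowerChar_ne_V c hc

lemma pv_lstrip_take (s : List Char) (h : PySem.Chars.lstrip s = s) (n : ℕ) :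
    PySem.Chars.lstrip (s.take n) = s.take n := by
  unfold PySem.Chars.lstrip at h ⊢
  rw [List.dropWhile_eq_self_iff] at h ⊢
  intro hl
  have hs : 0 < s.length := by simp at hl; omega
  rw [List.getElem_take]
  exact h hs

lemma pv_rstrip_prefix (s : List Char) : PySem.Chars.rstrip s <+: s := by
  unfold PySem.Chars.rstrip
  have h := List.dropWhile_suffix (l := s.reverse) PySem.Chars.isspace
  have h2 := List.reverse_prefix.mpr h
  simpa using h2

lemma pv_lstrip_strip (s : List Char) :
    PySem.Chars.lstrip (PySem.Chars.strip s) = PySem.Chars.strip s := by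
  unfold PySem.Chars.strip
  have h1 : PySem.Chars.lstrip (PySem.Chars.lstrip s) = PySem.Chars.lstrip s := by
    unfold PySem.Chars.lstrip
    exact List.dropWhile_idempotent _ _
  have h2 := pv_rstrip_prefix (PySem.Chars.lstrip s)
  obtain hx := List.prefix_iff_eq_take.mp h2
  rw [hx]
  exact pv_lstrip_take _ h1 _

-- every character cut off by rstrip is whitespace
lemma pv_rstrip_ws (s : List Char) (j : ℕ) (h1 : (PySem.Chars.rstrip s).length ≤ j) (h2 : j < s.length) :
    PySem.Chars.isspace s[j] = true := by
  have hdec : PySem.Chars.rstrip s ++ (List.takeWhile PySem.Chars.isspace s.reverse).reverse = s := by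
    unfold PySem.Chars.rstrip
    conv_rhs => rw [← List.reverse_reverse s,
      ← List.takeWhile_append_dropWhile (p := PySem.Chars.isspace) (l := s.reverse)]
    rw [List.reverse_append]
  have hmem : s[j] ∈ (List.takeWhile PySem.Chars.isspace s.reverse).reverse := by
    have hj2 : j < (PySem.Chars.rstrip s ++ (List.takeWhile PySem.Chars.isspace s.reverse).reverse).length := by
      rw [hdec]; exact h2
    have := List.getElem_append_right (as := PySem.Chars.rstrip s)
      (bs := (List.takeWhile PySem.Chars.isspace s.reverse).reverse) (i := j) h1 (h₂ := hj2)
    have hsj : s[j] = (PySem.Chars.rstrip s ++ (List.takeWhile PySem.Chars.isspace s.reverse).reverse)[j] := by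
      congr 1
      · exact hdec.symm
    rw [hsj, this]
    exact List.getElem_mem _
  rw [List.mem_reverse] at hmem
  exact List.mem_takeWhile_imp hmem

-- occurrences transfer from a prefix up to the whole list
lemma pv_occ_mono (u w sub : List Char) (h : u <+: w) (i : ℕ) (ho : sub <+: u.drop i) :
    sub <+: w.drop i := by
  obtain ⟨r, rfl⟩ := h
  by_cases hi : i ≤ u.length
  · rw [List.drop_append_of_le_length hi]
    exact ho.trans (List.prefix_append _ _)
  · have hnil : u.drop i = [] := by
      rw [List.drop_eq_nil_iff]; omega
    rw [hnil] at ho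
    have := List.prefix_nil.mp ho
    simp [this]

lemma pv_occ_take_iff (w sub : List Char) (hsub : sub ≠ []) (p i : ℕ) :
    sub <+: (w.take p).drop i ↔ (sub <+: w.drop i ∧ i + sub.length ≤ p) := by
  have hlen : 1 ≤ sub.length := by
    cases sub with
    | nil => simp at hsub
    | cons a l => simp
  rw [List.drop_take, List.prefix_take_iff]
  constructor
  · rintro ⟨h1, h2⟩
    exact ⟨h1, by omega⟩
  · rintro ⟨h1, h2⟩
    exact ⟨h1, by omega⟩

-- an occurrence that fits inside a prefix restricts to it
lemma pv_occ_into_prefix (u w sub : List Char) (h : u <+: w) (i : ℕ)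
    (hle : i + sub.length ≤ u.length) (ho : sub <+: w.drop i) : sub <+: u.drop i := by
  have hu : u = w.take u.length := List.prefix_iff_eq_take.mp h
  rw [hu, List.drop_take, List.prefix_take_iff]
  exact ⟨ho, by omega⟩

lemma pv_prefix_take_eq (u w : List Char) (h : u <+: w) (n : ℕ) (hn : n ≤ u.length) :
    w.take n = u.take n := by
  have hu : u = w.take u.length := List.prefix_iff_eq_take.mp h
  calc w.take n = (w.take u.length).take n := by
        rw [List.take_take]
        congr 1
        omega
    _ = u.take n := by rw [← hu]

lemma pv_occ_le (s sub : List Char) (i : ℕ) (hsub : sub ≠ []) (h : sub <+: s.drop i) :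
    i + sub.length ≤ s.length := by
  have h1 := h.length_le
  have hlen : 1 ≤ sub.length := by
    cases sub with
    | nil => simp at hsub
    | cons a l => simp
  simp at h1
  omega

lemma pv_occ_getElem (s sub : List Char) (i : ℕ) (h : sub <+: s.drop i) (k : ℕ)
    (hk1 : i ≤ k) (hk2 : k < i + sub.length) (hb : k < s.length) :
    s[k] = sub[k - i]'(by omega) := by
  have hd : k - i < (s.drop i).length := by simp; omega
  have h1 : sub[k - i]'(by omega) = (s.drop i)[k - i]'hd := h.getElem (by omega)
  rw [h1, List.getElem_drop]
  congr 1
  omega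

lemma pv_find_ne (s sub : List Char) (j : ℕ) (h : sub <+: s.drop j) :
    PySem.Chars.find s sub ≠ -1 := by
  rw [PySem.Chars.find_ne_neg_one_iff]
  rw [← PySem.Chars.isIn_iff_infix, ← PySem.Chars.exists_prefix_drop_iff_isIn]
  exact ⟨j, h⟩

lemma pv_find_eq (s sub : List Char) (q : ℕ) (h1 : sub <+: s.drop q)
    (h2 : ∀ i < q, ¬ sub <+: s.drop i) : PySem.Chars.find s sub = (q : ℤ) := by
  have hne := pv_find_ne s sub q h1
  have h0 : 0 ≤ PySem.Chars.find s sub := by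
    have := PySem.Chars.neg_one_le_find s sub
    omega
  obtain ⟨ha, hb⟩ := PySem.Chars.find_spec h0
  rcases lt_trichotomy ((PySem.Chars.find s sub).toNat) q with hlt | heq | hgt
  · exact absurd ha (h2 _ hlt)
  · omega
  · exact absurd h1 (hb q hgt)

-- a drop past an appended block
lemma pv_prefix_append_drop (a b x : List Char) (h : a ++ b <+: x) : b <+: x.drop a.length := by
  obtain ⟨r, hr⟩ := h
  rw [← hr, List.append_assoc, List.drop_left]
  exact List.prefix_append _ _

-- the core fact: A's four sequential find/cut passes equal B's single leftmost cut
lemma pv_getElem_idx_congr {α : Type} (l : List α) (i j : ℕ) (hij : i = j) (hi : i < l.length) :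
    l[i]'hi = l[j]'(hij ▸ hi) := by
  subst hij
  rfl

lemma pv_getElem_coll_congr {α : Type} (l l' : List α) (hll : l = l') (i : ℕ) (hi : i < l.length) :
    l[i]'hi = l'[i]'(hll ▸ hi) := by
  subst hll
  rfl

lemma pv_dead2c (s : List Char) : PySem.Chars.find (PySem.Chars.lower s) ['V', 'a', 'r', 'i', 'a', 'n', 't', ' ', 't', 'u', 'n', 'e', 'd', ' ', 'f', 'o', 'r'] = -1 :=
  pv_dead _ _ (by decide)

lemma pv_dead3c (s : List Char) : PySem.Chars.find (PySem.Chars.lower s) ['V', 'a', 'r', 'i', 'a', 'n', 't', ' ', 'f', 'o', 'r'] = -1 :=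
  pv_dead _ _ (by decide)

set_option maxHeartbeats 2000000 in
lemma pv_stage (t : String) (h : PySem.Chars.lstrip t.toList = t.toList) :
    (["variant markings adjusted for", "Variant tuned for", "Variant for", "adjusted for"] : List String).foldl
      (fun tt needle =>
        let idx := PySem.Str.find (PySem.Str.lower tt) needle
        if idx ≠ -1 then PySem.Str.strip (PySem.Str.slice tt none (some idx)) else tt) t
    = (let hits := ((["variant markings adjusted for", "Variant tuned for", "Variant for", "adjusted for"] : List String).map
          (fun n => PySem.Str.find (PySem.Str.lower t) n)).filter (fun i => i != -1)
       if hits ≠ [] then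
         PySem.Str.strip (PySem.Str.slice t none (some ((PySem.List.min? hits (fun i => i)).getD 0)))
       else t) := by
  simp only [List.foldl_cons, List.foldl_nil, List.map_cons, List.map_nil,
    List.filter_cons, List.filter_nil, ne_eq, PySem.Str.find_eq, PySem.Str.toList_lower,
    String.reduceToList, pv_dead2c, pv_dead3c, not_true, ite_false,
    bne_self_eq_false, Bool.false_eq_true]
  by_cases h1 : PySem.Chars.find (PySem.Chars.lower t.toList) ['v', 'a', 'r', 'i', 'a', 'n', 't', ' ', 'm', 'a', 'r', 'k', 'i', 'n', 'g', 's', ' ', 'a', 'd', 'j', 'u', 's', 't', 'e', 'd', ' ', 'f', 'o', 'r'] = -1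
  · by_cases h4 : PySem.Chars.find (PySem.Chars.lower t.toList) ['a', 'd', 'j', 'u', 's', 't', 'e', 'd', ' ', 'f', 'o', 'r'] = -1
    · simp only [h1, h4]
      norm_num
      intro hc
      exact absurd h4 hc
    · have hb4' : (PySem.Chars.find (PySem.Chars.lower t.toList) ['a', 'd', 'j', 'u', 's', 't', 'e', 'd', ' ', 'f', 'o', 'r'] != -1) = true :=
        bne_iff_ne.mpr h4
      simp only [h1, bne_self_eq_false, Bool.false_eq_true, ite_false, not_true,
        hb4', if_true]
      rw [if_pos h4]
      rw [if_pos (by simp : ([PySem.Chars.find (PySem.Chars.lower t.toList) ['a', 'd', 'j', 'u', 's', 't', 'e', 'd', ' ', 'f', 'o', 'r']] : List ℤ) ≠ [])]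
      simp only [PySem.List.min?, List.foldl_cons, List.foldl_nil, Option.getD_some]
  · -- the first needle is found, at position p
    have h0 : (0:ℤ) ≤ PySem.Chars.find (PySem.Chars.lower t.toList) ['v', 'a', 'r', 'i', 'a', 'n', 't', ' ', 'm', 'a', 'r', 'k', 'i', 'n', 'g', 's', ' ', 'a', 'd', 'j', 'u', 's', 't', 'e', 'd', ' ', 'f', 'o', 'r'] := by
      have := PySem.Chars.neg_one_le_find (PySem.Chars.lower t.toList) ['v', 'a', 'r', 'i', 'a', 'n', 't', ' ', 'm', 'a', 'r', 'k', 'i', 'n', 'g', 's', ' ', 'a', 'd', 'j', 'u', 's', 't', 'e', 'd', ' ', 'f', 'o', 'r']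
      omega
    obtain ⟨hocc1, hmin1⟩ := PySem.Chars.find_spec h0
    set S := t.toList with hS
    set L := PySem.Chars.lower S with hL
    set p := (PySem.Chars.find L ['v', 'a', 'r', 'i', 'a', 'n', 't', ' ', 'm', 'a', 'r', 'k', 'i', 'n', 'g', 's', ' ', 'a', 'd', 'j', 'u', 's', 't', 'e', 'd', ' ', 'f', 'o', 'r']).toNat with hp
    -- the needle decomposes, giving an occurrence of "adjusted for" at p + 17
    have hocc4' : ['a', 'd', 'j', 'u', 's', 't', 'e', 'd', ' ', 'f', 'o', 'r'] <+: L.drop (p + 17) := by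
      have hsplit : ['v', 'a', 'r', 'i', 'a', 'n', 't', ' ', 'm', 'a', 'r', 'k', 'i', 'n', 'g', 's', ' ', 'a', 'd', 'j', 'u', 's', 't', 'e', 'd', ' ', 'f', 'o', 'r'] = ['v', 'a', 'r', 'i', 'a', 'n', 't', ' ', 'm', 'a', 'r', 'k', 'i', 'n', 'g', 's', ' '] ++ ['a', 'd', 'j', 'u', 's', 't', 'e', 'd', ' ', 'f', 'o', 'r'] := rfl
      have := pv_prefix_append_drop _ _ _ (hsplit ▸ hocc1)
      rw [List.drop_drop] at this
      simpa using this
    have h4ne : PySem.Chars.find L ['a', 'd', 'j', 'u', 's', 't', 'e', 'd', ' ', 'f', 'o', 'r'] ≠ -1 := pv_find_ne _ _ (p + 17) hocc4'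
    have h04 : (0:ℤ) ≤ PySem.Chars.find L ['a', 'd', 'j', 'u', 's', 't', 'e', 'd', ' ', 'f', 'o', 'r'] := by
      have := PySem.Chars.neg_one_le_find L ['a', 'd', 'j', 'u', 's', 't', 'e', 'd', ' ', 'f', 'o', 'r']
      omega
    obtain ⟨hocc4, hmin4⟩ := PySem.Chars.find_spec h04
    set q := (PySem.Chars.find L ['a', 'd', 'j', 'u', 's', 't', 'e', 'd', ' ', 'f', 'o', 'r']).toNat with hq
    have hlen1 : p + 29 ≤ L.length := by
      have := pv_occ_le L _ p (by decide) hocc1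
      simpa using this
    have hLS : L.length = S.length := by simp [hL, PySem.Chars.lower]
    -- no straddling: if q < p then the whole 12-char needle sits before p
    have hsep : q < p → q + 12 ≤ p := by
      intro hqp
      by_contra hcon
      have hbp : p < L.length := by omega
      have e1 : L[p]'hbp = (['v', 'a', 'r', 'i', 'a', 'n', 't', ' ', 'm', 'a', 'r', 'k', 'i', 'n', 'g', 's', ' ', 'a', 'd', 'j', 'u', 's', 't', 'e', 'd', ' ', 'f', 'o', 'r'] : List Char)[p - p]'(by simp) :=
        pv_occ_getElem L _ p hocc1 p le_rfl (by simp) hbp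
      have e2 : L[p]'hbp = (['a', 'd', 'j', 'u', 's', 't', 'e', 'd', ' ', 'f', 'o', 'r'] : List Char)[p - q]'(by simp; omega) :=
        pv_occ_getElem L _ q hocc4 p (by omega) (by simp; omega) hbp
      have e3 : ('v' : Char) ∈ (['a', 'd', 'j', 'u', 's', 't', 'e', 'd', ' ', 'f', 'o', 'r'] : List Char) := by
        have hm := List.getElem_mem (l := (['a', 'd', 'j', 'u', 's', 't', 'e', 'd', ' ', 'f', 'o', 'r'] : List Char)) (n := p - q) (by simp; omega)
        simp at e1
        rw [e1] at e2
        rw [← e2] at hm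
        exact hm
      revert e3
      decide
    clear_value S L p q
    have hc1 : PySem.Chars.find L ['v', 'a', 'r', 'i', 'a', 'n', 't', ' ', 'm', 'a', 'r', 'k', 'i', 'n', 'g', 's', ' ', 'a', 'd', 'j', 'u', 's', 't', 'e', 'd', ' ', 'f', 'o', 'r'] = (p : ℤ) := by
      rw [hp]
      exact (Int.toNat_of_nonneg h0).symm
    have hc4 : PySem.Chars.find L ['a', 'd', 'j', 'u', 's', 't', 'e', 'd', ' ', 'f', 'o', 'r'] = (q : ℤ) := by
      rw [hq]
      exact (Int.toNat_of_nonneg h04).symm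
    have hpS : p ≤ S.length := by omega
    have hplen : (S.take p).length = p := by
      rw [List.length_take]
      exact Nat.min_eq_left hpS
    have hplenL : (L.take p).length = p := by
      rw [List.length_take]
      refine Nat.min_eq_left ?_
      rw [hLS]
      exact hpS
    have hu : (PySem.Str.strip (PySem.Str.slice t none
        (some (PySem.Chars.find L ['v', 'a', 'r', 'i', 'a', 'n', 't', ' ', 'm', 'a', 'r', 'k', 'i', 'n', 'g', 's', ' ', 'a', 'd', 'j', 'u', 's', 't', 'e', 'd', ' ', 'f', 'o', 'r'])))).toList
        = PySem.Chars.rstrip (S.take p) := by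
      rw [PySem.Str.toList_strip, PySem.Str.toList_slice, ← hS, hc1]
      rw [PySem.Chars.slice_eq_listSlice, PySem.List.slice_to _ (by omega : (0:ℤ) ≤ (p:ℤ))]
      rw [Int.toNat_natCast]
      unfold PySem.Chars.strip
      rw [pv_lstrip_take S h p]
    have hlw : PySem.Chars.lower (S.take p) = L.take p := by
      rw [hL]
      unfold PySem.Chars.lower
      exact List.map_take ..
    have hpre : PySem.Chars.lower (PySem.Chars.rstrip (S.take p)) <+: PySem.Chars.lower (S.take p) := by
      unfold PySem.Chars.lower
      exact List.IsPrefix.map _ (pv_rstrip_prefix _)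
    have hb1 : (PySem.Chars.find L ['v', 'a', 'r', 'i', 'a', 'n', 't', ' ', 'm', 'a', 'r', 'k', 'i', 'n', 'g', 's', ' ', 'a', 'd', 'j', 'u', 's', 't', 'e', 'd', ' ', 'f', 'o', 'r'] != -1) = true := by
      rw [hc1]
      exact bne_iff_ne.mpr (by omega)
    have hb4 : (PySem.Chars.find L ['a', 'd', 'j', 'u', 's', 't', 'e', 'd', ' ', 'f', 'o', 'r'] != -1) = true := by
      rw [hc4]
      exact bne_iff_ne.mpr (by omega)
    by_cases hqlt : q < p
    · -- B cuts at q; A's second pass cuts at the same q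
      have hsep' : q + 12 ≤ p := hsep hqlt
      have hocc4p : (['a', 'd', 'j', 'u', 's', 't', 'e', 'd', ' ', 'f', 'o', 'r'] : List Char) <+: (L.take p).drop q :=
        (pv_occ_take_iff L _ (by decide) p q).mpr ⟨hocc4, by simp; omega⟩
      have hulen : q + 12 ≤ (PySem.Chars.rstrip (S.take p)).length := by
        by_contra hno
        have hql : q + 11 < (S.take p).length := by rw [hplen]; omega
        have hws : PySem.Chars.isspace ((S.take p)[q+11]'hql) = true :=
          pv_rstrip_ws _ _ (by omega) hql
        have hbl : q + 11 < (L.take p).length := by rw [hplenL]; omega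
        have hr : (L.take p)[q+11]'hbl = (['a', 'd', 'j', 'u', 's', 't', 'e', 'd', ' ', 'f', 'o', 'r'] : List Char)[11]'(by simp) := by
          have h5 := pv_occ_getElem (L.take p) _ q hocc4p (q+11) (by omega) (by simp) hbl
          exact h5.trans (pv_getElem_idx_congr _ _ _ (by omega) _)
        have hr2 : PySem.Chars.lowerChar ((S.take p)[q+11]'hql) = 'r' := by
          have hm : (L.take p)[q+11]'hbl = PySem.Chars.lowerChar ((S.take p)[q+11]'hql) := by
            have hLm : List.map PySem.Chars.lowerChar (S.take p) = L.take p := hlw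
            have h6 := pv_getElem_coll_congr _ _ hLm.symm (q+11) hbl
            rw [h6]
            exact List.getElem_map ..
          rw [← hm, hr]
          rfl
        rw [pv_ws_lowerChar _ hws] at hr2
        rw [hr2] at hws
        exact absurd hws (by decide)
      have hfind : PySem.Chars.find (PySem.Chars.lower (PySem.Chars.rstrip (S.take p)))
          ['a', 'd', 'j', 'u', 's', 't', 'e', 'd', ' ', 'f', 'o', 'r'] = (q : ℤ) := by
        apply pv_find_eq
        · apply pv_occ_into_prefix _ (PySem.Chars.lower (S.take p)) _ hpre
          · simpa [PySem.Chars.lower] using hulen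
          · rw [hlw]; exact hocc4p
        · intro i hi hocc_i
          have h1' := pv_occ_mono _ _ _ hpre i hocc_i
          rw [hlw] at h1'
          have h2' := ((pv_occ_take_iff L _ (by decide) p i).mp h1').1
          exact hmin4 i hi h2'
      rw [if_pos h1, hu, hfind]
      rw [if_pos (show ¬((q:ℤ) = -1) by omega)]
      simp only [hb1, hb4, if_true]
      rw [if_pos (by simp : ([PySem.Chars.find L ['v', 'a', 'r', 'i', 'a', 'n', 't', ' ', 'm', 'a', 'r', 'k', 'i', 'n', 'g', 's', ' ', 'a', 'd', 'j', 'u', 's', 't', 'e', 'd', ' ', 'f', 'o', 'r'],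
        PySem.Chars.find L ['a', 'd', 'j', 'u', 's', 't', 'e', 'd', ' ', 'f', 'o', 'r']] : List ℤ) ≠ [])]
      simp only [PySem.List.min?, List.foldl_cons, List.foldl_nil, hc1, hc4]
      rw [if_pos (show (q:ℤ) < (p:ℤ) by omega)]
      simp only [Option.getD_some]
      have hu2 : (PySem.Str.strip (PySem.Str.slice t none (some ((p:ℤ))))).toList
          = PySem.Chars.rstrip (S.take p) := by
        rw [← hc1]
        exact hu
      rw [← String.toList_inj]
      rw [PySem.Str.toList_strip, PySem.Str.toList_slice, hu2,
        PySem.Str.toList_strip, PySem.Str.toList_slice, ← hS]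
      rw [PySem.Chars.slice_eq_listSlice, PySem.Chars.slice_eq_listSlice,
        PySem.List.slice_to _ (by omega : (0:ℤ) ≤ (q:ℤ)), PySem.List.slice_to _ (by omega : (0:ℤ) ≤ (q:ℤ))]
      rw [Int.toNat_natCast]
      have htake : (PySem.Chars.rstrip (S.take p)).take q = S.take q := by
        have h1' := pv_prefix_take_eq _ _ (pv_rstrip_prefix (S.take p)) q (by omega)
        rw [← h1', List.take_take, Nat.min_eq_left (le_of_lt hqlt)]
      rw [htake]
    · -- p ≤ q : A's second pass finds nothing; both cut at p
      have hfindneg : PySem.Chars.find (PySem.Chars.lower (PySem.Chars.rstrip (S.take p)))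
          ['a', 'd', 'j', 'u', 's', 't', 'e', 'd', ' ', 'f', 'o', 'r'] = -1 := by
        rw [PySem.Chars.find_eq_neg_one_iff]
        intro hinf
        obtain ⟨i, hocc_i⟩ := (PySem.Chars.exists_prefix_drop_iff_isIn _ _).mpr
          ((PySem.Chars.isIn_iff_infix _ _).mpr hinf)
        have hlen_i : i + 12 ≤ (PySem.Chars.lower (PySem.Chars.rstrip (S.take p))).length := by
          simpa using pv_occ_le _ _ i (by decide) hocc_i
        have hwlen : (PySem.Chars.rstrip (S.take p)).length ≤ p := by
          have := (pv_rstrip_prefix (S.take p)).length_le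
          rw [hplen] at this
          exact this
        have hup := pv_occ_mono _ _ _ hpre i hocc_i
        rw [hlw] at hup
        have h2' := ((pv_occ_take_iff L _ (by decide) p i).mp hup).1
        have hlen2 : i + 12 ≤ p := by
          have hx : (PySem.Chars.lower (PySem.Chars.rstrip (S.take p))).length
              = (PySem.Chars.rstrip (S.take p)).length := by
            simp [PySem.Chars.lower]
          omega
        exact hmin4 i (by omega) h2'
      rw [if_pos h1, hu, hfindneg]
      rw [if_neg (show ¬¬((-1:ℤ) = -1) by simp)]
      simp only [hb1, hb4, if_true]
      rw [if_pos (by simp : ([PySem.Chars.find L ['v', 'a', 'r', 'i', 'a', 'n', 't', ' ', 'm', 'a', 'r', 'k', 'i', 'n', 'g', 's', ' ', 'a', 'd', 'j', 'u', 's', 't', 'e', 'd', ' ', 'f', 'o', 'r'],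
        PySem.Chars.find L ['a', 'd', 'j', 'u', 's', 't', 'e', 'd', ' ', 'f', 'o', 'r']] : List ℤ) ≠ [])]
      simp only [PySem.List.min?, List.foldl_cons, List.foldl_nil, hc1, hc4]
      rw [if_neg (show ¬((q:ℤ) < (p:ℤ)) by omega)]
      simp only [Option.getD_some]

-- ===== VERDICT (by name: the statement is the Claim_ definition above) =====
theorem clean_visual_notes_py_spec : Claim_equal_clean_visual_notes_py := by
  intro text location location_english _hdom
  unfold Spec_clean_visual_notes_py clean_visual_notes_py clean_visual_notes_py_alt pvNeedles
  simp only []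
  have hkey := pv_stage (PySem.Str.strip text) (by rw [PySem.Str.toList_strip]; exact pv_lstrip_strip _)
  simp only [] at hkey
  rw [hkey]
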